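-- pv_equiv track=rewrite | github.com/CClairvoyant/iti0102-2022 | KT/kt4/exam.py | create_dictionary_from_directed_string_pairs
-- ===== SOURCE A (Python) =====
-- def create_dictionary_from_directed_string_pairs(pairs: list) -> dict:
--     """
--     Create dictionary from directed string pairs.
--
--     One pair consists of two strings and "direction" symbol ("<" or ">").
--     The key is the string which is on the "larger" side,
--     the value is the string which is on the "smaller" side.
--
--     For example:
--     ab>cd => "ab" is the key, "cd" is the value
--     kl<mn => "mn" is the key, "kl" is the value
--
--     The input consists of list of such strings.
--     The output is a dictionary, where values are lists.
--     Each key cannot contain duplicate elements.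
--     The order of the elements in the values should be
--     the same as they appear in the input list.
--
--     create_dictionary_from_directed_string_pairs([]) => {}
--
--     create_dictionary_from_directed_string_pairs(["a>b", "a>c"]) =>
--     {"a": ["b", "c"]}
--
--     create_dictionary_from_directed_string_pairs(["a>b", "a<b"]) =>
--     {"a": ["b"], "b": ["a"]}
--
--     create_dictionary_from_directed_string_pairs(["1>1", "1>2", "1>1"]) =>
--     {"1": ["1", "2"]}
--     """
--     d = {}
--     for pair in pairs:
--         if len(pair.split(">")) == 2:
--             if pair.split(">")[0] not in d:
--                 d[pair.split(">")[0]] = [pair.split(">")[-1]]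
--             elif pair.split(">")[0] in d and pair.split(">")[-1] not in d[pair.split(">")[0]]:
--                 d[pair.split(">")[0]].append(pair.split(">")[-1])
--         elif len(pair.split("<")) == 2:
--             if pair.split("<")[-1] not in d:
--                 d[pair.split("<")[-1]] = [pair.split("<")[0]]
--             elif pair.split("<")[-1] in d and pair.split("<")[0] not in d[pair.split("<")[-1]]:
--                 d[pair.split("<")[-1]].append(pair.split("<")[0])
--     return d
-- ===== SOURCE B (Python) =====
-- def _parse(pair):
--     """Return (key, value) for a directed pair, or None if malformed.
--
--     The '>' split is tried first, exactly as in the original: a pair counts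
--     as directed only when the split yields exactly two parts.
--     """
--     parts = pair.split(">")
--     if len(parts) == 2:
--         return parts[0], parts[-1]
--     parts = pair.split("<")
--     if len(parts) == 2:
--         return parts[-1], parts[0]
--     return None
--
--
-- def create_dictionary_from_directed_string_pairs(pairs: list) -> dict:
--     # Pass 1: parse every pair into an ordered (key, value) list, no dict at all.
--     kvs = [kv for kv in (_parse(p) for p in pairs) if kv is not None]
--     # Pass 2: group by key with a per-key scan over the parsed list; the keys
--     # appear in first-occurrence order and each value list is the ordered
--     # dedup of all values seen for that key.
--     return {k: list(dict.fromkeys(v for k2, v in kvs if k2 == k))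
--             for k in dict.fromkeys(k for k, _ in kvs)}
-- ===== Notes on version B (the rewrite author's own statement) =====
-- stated objective: alternative
-- what changed: A builds the dict incrementally in one pass, mutating per-key lists with a membership-checked append; B builds no dict during the loop at all: it first parses everything into a flat ordered (key,value) list, then for each first-occurrence-distinct key performs a separate filtering scan over that flat list and dedups the collected values.
import Mathlib
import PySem

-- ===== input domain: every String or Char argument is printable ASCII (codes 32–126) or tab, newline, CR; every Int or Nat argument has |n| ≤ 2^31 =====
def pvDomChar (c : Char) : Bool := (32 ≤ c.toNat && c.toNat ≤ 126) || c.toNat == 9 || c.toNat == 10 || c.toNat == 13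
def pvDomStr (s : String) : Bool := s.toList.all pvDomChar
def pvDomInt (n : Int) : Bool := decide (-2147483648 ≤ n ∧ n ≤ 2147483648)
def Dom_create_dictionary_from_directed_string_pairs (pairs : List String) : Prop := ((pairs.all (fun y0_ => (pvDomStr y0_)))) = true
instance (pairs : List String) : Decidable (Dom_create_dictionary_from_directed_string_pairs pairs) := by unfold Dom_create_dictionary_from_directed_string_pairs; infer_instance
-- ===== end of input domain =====

-- B replaces A's single-pass incremental dict (membership-checked per-key appends) by a flat
-- parse pass followed by a per-distinct-key filtering scan over the parsed list (objective: alternative).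


-- ===== PORT A =====
-- loop body of A, one Python iteration (pair.split(sep) → (Str.split? · sep).getD [],
-- list indexing [0]/[-1] → pyGet? (in range under the length-2 guard), d[k].append(v) → Dict.modify)
def pvStepA (d : PySem.Dict String (List String)) (pair : String) : PySem.Dict String (List String) :=
  let sg := (PySem.Str.split? pair ">").getD []
  if sg.length = 2 then
    if d.contains ((PySem.List.pyGet? sg 0).getD "") = false then
      d.insert ((PySem.List.pyGet? sg 0).getD "") [(PySem.List.pyGet? sg (-1)).getD ""]
    else if d.contains ((PySem.List.pyGet? sg 0).getD "") &&
            !((d.getD ((PySem.List.pyGet? sg 0).getD "") []).contains ((PySem.List.pyGet? sg (-1)).getD "")) then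
      d.modify ((PySem.List.pyGet? sg 0).getD "") [] (· ++ [(PySem.List.pyGet? sg (-1)).getD ""])
    else d
  else
    let sl := (PySem.Str.split? pair "<").getD []
    if sl.length = 2 then
      if d.contains ((PySem.List.pyGet? sl (-1)).getD "") = false then
        d.insert ((PySem.List.pyGet? sl (-1)).getD "") [(PySem.List.pyGet? sl 0).getD ""]
      else if d.contains ((PySem.List.pyGet? sl (-1)).getD "") &&
              !((d.getD ((PySem.List.pyGet? sl (-1)).getD "") []).contains ((PySem.List.pyGet? sl 0).getD "")) then
        d.modify ((PySem.List.pyGet? sl (-1)).getD "") [] (· ++ [(PySem.List.pyGet? sl 0).getD ""])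
      else d
    else d

def create_dictionary_from_directed_string_pairs (pairs : List String) : List (String × List String) :=
  (pairs.foldl pvStepA PySem.Dict.empty).items

-- ===== PORT B =====
-- Source B's _parse helper
def pvParse (pair : String) : Option (String × String) :=
  let parts := (PySem.Str.split? pair ">").getD []
  if parts.length = 2 then
    some ((PySem.List.pyGet? parts 0).getD "", (PySem.List.pyGet? parts (-1)).getD "")
  else
    let parts := (PySem.Str.split? pair "<").getD []
    if parts.length = 2 then
      some ((PySem.List.pyGet? parts (-1)).getD "", (PySem.List.pyGet? parts 0).getD "")
    else none

def create_dictionary_from_directed_string_pairs_alt (pairs : List String) : List (String × List String) :=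
  -- kvs = [kv for kv in (_parse(p) for p in pairs) if kv is not None]
  let kvs := (pairs.map pvParse).filterMap id
  -- {k: list(dict.fromkeys(v for k2, v in kvs if k2 == k)) for k in dict.fromkeys(k for k, _ in kvs)}
  (PySem.List.dedup (kvs.map Prod.fst)).map (fun k =>
    (k, PySem.List.dedup ((kvs.filter (fun p => p.1 == k)).map Prod.snd)))

-- ===== PRECONDITION & SPEC =====
def Spec_create_dictionary_from_directed_string_pairs (pairs : List String) (out : List (String × List String)) : Prop := out = create_dictionary_from_directed_string_pairs_alt pairs
instance (pairs : List String) (out : List (String × List String)) : Decidable (Spec_create_dictionary_from_directed_string_pairs pairs out) := by unfold Spec_create_dictionary_from_directed_string_pairs; infer_instance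

-- ===== CLAIM (what is proved, stated in full; the proofs are below) =====
def Claim_equal_create_dictionary_from_directed_string_pairs : Prop := ∀ (pairs : List String), Dom_create_dictionary_from_directed_string_pairs pairs → Spec_create_dictionary_from_directed_string_pairs pairs (create_dictionary_from_directed_string_pairs pairs)

-- ===== LEMMAS AND PROOFS =====

-- A's insertion at a parsed (key, value), as a standalone function
def pvIns (d : PySem.Dict String (List String)) (k v : String) : PySem.Dict String (List String) :=
  if d.contains k = false then d.insert k [v]
  else if d.contains k && !((d.getD k []).contains v) then d.modify k [] (· ++ [v])
  else d

-- B's result as a function of the parsed (key, value) list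
def pvG (kvs : List (String × String)) : List (String × List String) :=
  (PySem.Set.ofList (kvs.map Prod.fst)).map (fun k =>
    (k, PySem.Set.ofList ((kvs.filter (fun p => p.1 == k)).map Prod.snd)))

lemma pvStepA_eq_parse (d : PySem.Dict String (List String)) (pair : String) :
    pvStepA d pair = match pvParse pair with
      | some kv => pvIns d kv.1 kv.2
      | none => d := by
  unfold pvStepA pvParse pvIns
  by_cases h1 : ((PySem.Str.split? pair ">").getD []).length = 2 <;>
    by_cases h2 : ((PySem.Str.split? pair "<").getD []).length = 2 <;>
      simp [h1, h2]

-- A's loop is the pvIns fold over the parsed list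
lemma pvFoldA_eq (pairs : List String) (d : PySem.Dict String (List String)) :
    pairs.foldl pvStepA d =
      ((pairs.map pvParse).filterMap id).foldl (fun d p => pvIns d p.1 p.2) d := by
  induction pairs generalizing d with
  | nil => rfl
  | cons pair rest ih =>
    simp only [List.map_cons, List.foldl_cons, List.filterMap_cons]
    rw [pvStepA_eq_parse]
    cases pvParse pair with
    | none => exact ih d
    | some kv => simp only [List.foldl_cons]; exact ih (pvIns d kv.1 kv.2)

lemma pvFilter_eq_nil {kvs : List (String × String)} {k : String}
    (h : k ∉ kvs.map Prod.fst) : kvs.filter (fun p => p.1 == k) = [] := by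
  rw [List.filter_eq_nil_iff]
  intro p hp
  simp only [beq_iff_eq]
  intro hk
  exact h (hk ▸ List.mem_map_of_mem hp)

-- the invariant: the pvIns fold over kvs has exactly pvG kvs as its items
lemma pvFold_items (kvs : List (String × String)) :
    (kvs.foldl (fun d p => pvIns d p.1 p.2) PySem.Dict.empty).items = pvG kvs := by
  induction kvs using List.reverseRecOn with
  | nil => rfl
  | append_singleton kvs kv ih =>
    obtain ⟨k, v⟩ := kv
    rw [List.foldl_append, List.foldl_cons, List.foldl_nil]
    set D := kvs.foldl (fun d p => pvIns d p.1 p.2) PySem.Dict.empty with hD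
    -- the keys of D
    have hkeys : D.keys = PySem.Set.ofList (kvs.map Prod.fst) := by
      show D.items.map Prod.fst = _
      rw [ih]
      unfold pvG
      simp [List.map_map, Function.comp_def]
    have hnd : D.keys.Nodup := by rw [hkeys]; exact PySem.Set.nodup_ofList _
    have hcontains : D.contains k = decide (k ∈ kvs.map Prod.fst) := by
      rw [PySem.Dict.contains_eq_decide_mem_keys, hkeys]
      by_cases h : k ∈ kvs.map Prod.fst <;>
        simp [h, PySem.Set.mem_ofList]
    -- shape of pvG (kvs ++ [(k, v)])
    have hGapp : pvG (kvs ++ [(k, v)]) =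
        (PySem.Set.add (PySem.Set.ofList (kvs.map Prod.fst)) k).map (fun k' =>
          (k', PySem.Set.ofList ((kvs.filter (fun p => p.1 == k')).map Prod.snd ++
                (if k = k' then [v] else [])))) := by
      unfold pvG
      rw [List.map_append]
      simp only [List.map_cons, List.map_nil]
      rw [PySem.Set.ofList_append_singleton]
      apply List.map_congr_left
      intro k' _
      rw [List.filter_append]
      by_cases hkk : k = k' <;> simp [hkk]
    by_cases hk : k ∈ kvs.map Prod.fst
    · -- key already present
      have hc : D.contains k = true := by rw [hcontains]; simp [hk]
      set vals := (kvs.filter (fun p => p.1 == k)).map Prod.snd with hvals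
      have hmem : (k, PySem.Set.ofList vals) ∈ D.items := by
        rw [ih]; unfold pvG
        exact List.mem_map_of_mem ((PySem.Set.mem_ofList _ _).mpr hk)
      have hgetD : D.getD k [] = PySem.Set.ofList vals :=
        PySem.Dict.getD_of_mem_items D hmem hnd []
      rw [hGapp, PySem.Set.add_of_mem ((PySem.Set.mem_ofList _ _).mpr hk)]
      by_cases hv : v ∈ vals
      · -- duplicate value: A leaves D unchanged, B's dedup swallows it
        have hvmem : v ∈ D.getD k [] := by
          rw [hgetD]; exact (PySem.Set.mem_ofList _ _).mpr hv
        unfold pvIns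
        rw [if_neg (by simp [hc]), if_neg (by simp [hc, hvmem])]
        rw [ih]
        unfold pvG
        apply List.map_congr_left
        intro k' _
        by_cases hkk : k = k'
        · subst hkk
          rw [if_pos rfl, PySem.Set.ofList_append_singleton,
              PySem.Set.add_of_mem ((PySem.Set.mem_ofList _ _).mpr hv)]
        · simp [hkk]
      · -- new value: A appends at key k, B's filtered list grows by v
        have hvmem : v ∉ D.getD k [] := by
          rw [hgetD]
          intro h
          exact hv ((PySem.Set.mem_ofList _ _).mp h)
        unfold pvIns
        rw [if_neg (by simp [hc]), if_pos (by simp [hc, hvmem])]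
        unfold PySem.Dict.modify
        rw [PySem.Dict.items_insert_of_contains _ _ hc, hgetD, ih]
        unfold pvG
        rw [List.map_map]
        apply List.map_congr_left
        intro k' _
        by_cases hkk : k' = k
        · subst hkk
          simp only [Function.comp_def, beq_self_eq_true, if_pos, if_pos rfl]
          rw [PySem.Set.ofList_append_singleton,
              PySem.Set.add_of_not_mem (fun h => hv ((PySem.Set.mem_ofList _ _).mp h))]
        · rw [if_neg (fun h => hkk (Eq.symm h))]
          simp [hkk]
    · -- fresh key: both sides append (k, [v]) at the end
      have hc : D.contains k = false := by rw [hcontains]; simp [hk]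
      unfold pvIns
      rw [if_pos (by simp [hc])]
      rw [PySem.Dict.items_insert_of_not_contains _ _ hc, ih, hGapp,
          PySem.Set.add_of_not_mem (fun h => hk ((PySem.Set.mem_ofList _ _).mp h)),
          List.map_append]
      congr 1
      · unfold pvG
        apply List.map_congr_left
        intro k' hk'
        have hkk : k ≠ k' := by
          intro h
          exact hk ((PySem.Set.mem_ofList _ _).mp (h ▸ hk'))
        simp [hkk]
      · simp [pvFilter_eq_nil hk, PySem.Set.ofList]

-- ===== VERDICT (by name: the statement is the Claim_ definition above) =====
theorem create_dictionary_from_directed_string_pairs_spec : Claim_equal_create_dictionary_from_directed_string_pairs := by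
  intro pairs _
  unfold Spec_create_dictionary_from_directed_string_pairs
  unfold create_dictionary_from_directed_string_pairs create_dictionary_from_directed_string_pairs_alt
  rw [pvFoldA_eq, pvFold_items]
  simp only [PySem.List.dedup_eq_ofList]
  rfl
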